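-- pv_equiv track=rewrite | github.com/isk02206/python | informatics/partial-examination-term-1-december-2016-ga-hyun-choi/the-billion-year-war.py | restrictionSites
-- ===== SOURCE A (Python) =====
-- def reverseComplement(sequence):
--     if isinstance(sequence, str):
--         final = ''
--         for i in range(len(sequence)-1, 0-1, -1):
--             if sequence[i] == 'A':
--                 final += 'T'
--             elif sequence[i] == 'T':
--                 final += 'A'
--             elif sequence[i] == 'G':
--                 final += 'C'
--             else:
--                 final += 'G'
--         return final
--
-- def restrictionSites(sequence, minLength=4, maxLength=12):
--     final = []
--
--     if minLength % 2 == 0: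
--         hmin = int(minLength/2)
--     else:
--         hmin = int((minLength+1)/2)
--     if maxLength % 2 == 0:
--         hmax = int(maxLength/2)
--     else:
--         hmax = int((maxLength-1)/2)
--     for i in range(len(sequence)):
--         for n in range(hmin, hmax+1):
--             seq = sequence[i:i+n]+reverseComplement(sequence[i:i+n])
--             if seq == sequence[i:i+2*n]:
--                 final.append((i+1, seq))
--     return list(final)
-- ===== SOURCE B (Python) =====
-- def _comp(ch):
--     if ch == 'A':
--         return 'T'
--     if ch == 'T':
--         return 'A'
--     if ch == 'G':
--         return 'C'
--     return 'G'
--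
-- def restrictionSites(sequence, minLength=4, maxLength=12):
--     hmin = -(-minLength // 2)   # ceil(minLength / 2)
--     hmax = maxLength // 2
--     lo = max(hmin, 1)
--     L = len(sequence)
--     if hmax < lo:
--         return []
--     # expand around every center with early exit on the first mismatching pair;
--     # every prefix-window that keeps matching is a site
--     sites = []
--     for c in range(L + 1):
--         k = 0
--         lim = min(hmax, c, L - c)
--         while k < lim and _comp(sequence[c - k - 1]) == sequence[c + k]:
--             k += 1
--             if k >= lo:
--                 sites.append((c - k, k))
--     sites.sort()
--     return [(i + 1, sequence[i:i + 2 * k]) for (i, k) in sites]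
-- ===== Notes on version B (the rewrite author's own statement) =====
-- stated objective: faster
-- what changed: Instead of building slice+reverse-complement strings and comparing them for every (position, half-length) pair, B expands around each center with early exit on the first mismatching pair, collecting every matching prefix-window and sorting the collected pairs once.
-- outside the precondition, e.g. on restrictionSites('ACG', 0, 2): A returns [(1, ''), (2, ''), (2, 'CG'), (3, '')], B returns [(2, 'CG')]
import Mathlib
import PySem

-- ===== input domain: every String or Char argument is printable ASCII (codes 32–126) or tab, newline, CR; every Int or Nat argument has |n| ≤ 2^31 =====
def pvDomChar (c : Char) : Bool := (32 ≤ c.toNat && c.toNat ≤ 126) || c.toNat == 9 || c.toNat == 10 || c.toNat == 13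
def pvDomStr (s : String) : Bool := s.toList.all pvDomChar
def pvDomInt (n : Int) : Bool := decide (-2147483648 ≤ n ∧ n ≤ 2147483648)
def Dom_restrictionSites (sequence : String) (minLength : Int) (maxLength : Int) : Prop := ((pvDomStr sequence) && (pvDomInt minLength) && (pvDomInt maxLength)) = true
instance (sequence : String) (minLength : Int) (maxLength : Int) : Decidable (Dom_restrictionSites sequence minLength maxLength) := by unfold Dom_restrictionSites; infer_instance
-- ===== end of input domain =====

-- B replaces A's per-(position, half-length) slice+reverse-complement+compare scan by a
-- single expansion around each center with early exit on the first mismatching pair,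
-- emitting every matching prefix-window and sorting the collected sites once (measured faster).

-- ===== PORT A =====
-- port of reverseComplement, on code points (the isinstance-str guard is always true at its call sites)
def reverseComplement (sequence : List Char) : List Char :=
  (PySem.List.pyRange (PySem.List.len sequence - 1) (0 - 1) (-1)).foldl
    (fun final i =>
      if PySem.List.pyGetD sequence i ' ' = 'A' then final ++ ['T']
      else if PySem.List.pyGetD sequence i ' ' = 'T' then final ++ ['A']
      else if PySem.List.pyGetD sequence i ' ' = 'G' then final ++ ['C']
      else final ++ ['G']) []

def restrictionSites (sequence : String) (minLength : Int) (maxLength : Int) : List (Int × String) :=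
  let l := sequence.toList
  -- int(x/2): the numerator is even in every branch taken, so true division + int() is exact floor division (|x| ≤ 2^31 < 2^53)
  let hmin : Int := if PySem.Int.mod minLength 2 = 0 then PySem.Int.floordiv minLength 2
                    else PySem.Int.floordiv (minLength + 1) 2
  let hmax : Int := if PySem.Int.mod maxLength 2 = 0 then PySem.Int.floordiv maxLength 2
                    else PySem.Int.floordiv (maxLength - 1) 2
  (PySem.List.pyRange 0 (PySem.List.len l) 1).foldl
    (fun final i =>
      (PySem.List.pyRange hmin (hmax + 1) 1).foldl
        (fun final n =>
          let seq := PySem.List.slice l (some i) (some (i + n)) ++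
                     reverseComplement (PySem.List.slice l (some i) (some (i + n)))
          if seq = PySem.List.slice l (some i) (some (i + 2 * n)) then
            final ++ [(i + 1, String.ofList seq)]
          else final)
        final)
    []

-- ===== PORT B =====
def pvComp (ch : Char) : Char :=
  if ch = 'A' then 'T' else if ch = 'T' then 'A' else if ch = 'G' then 'C' else 'G'

-- the while-loop of B's center expansion (fuel = lim - k, decremented each step);
-- every prefix-window that keeps matching is appended as a site
def pvCollect (l : List Char) (lo c : Int) : Nat → Int → List (Int × Int) → List (Int × Int)
  | 0, _, sites => sites
  | fuel + 1, k, sites =>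
    if pvComp (PySem.List.pyGetD l (c - k - 1) ' ') = PySem.List.pyGetD l (c + k) ' ' then
      pvCollect l lo c fuel (k + 1)
        (if lo ≤ k + 1 then sites ++ [(c - (k + 1), k + 1)] else sites)
    else sites

def restrictionSites_alt (sequence : String) (minLength : Int) (maxLength : Int) : List (Int × String) :=
  let l := sequence.toList
  let hmin : Int := -(PySem.Int.floordiv (-minLength) 2)
  let hmax : Int := PySem.Int.floordiv maxLength 2
  let lo : Int := max hmin 1
  let L : Int := PySem.List.len l
  if hmax < lo then []
  else
    let sites := (PySem.List.pyRange 0 (L + 1)).foldl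
      (fun sites c => pvCollect l lo c (min hmax (min c (L - c))).toNat 0 sites) []
    -- the Python sort of the collected pair list: list.sort on int pairs is the
    -- stable sort under tuple (lexicographic) order, i.e. PySem's sorted with key toLex
    (PySem.List.sorted sites (fun p => toLex p)).map
      (fun p => (p.1 + 1, String.ofList (PySem.List.slice l (some p.1) (some (p.1 + 2 * p.2)))))

-- ===== PRECONDITION & SPEC =====
-- Pre_ restricts to the task's natural domain (positive site length, or an empty length range):
-- for minLength ≤ 0 with a nonempty half-length range A emits degenerate empty-string results at
-- every position and negative slice lengths hit Python's negative-index wraparound; B reports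
-- only genuine sites there.
def Pre_restrictionSites (sequence : String) (minLength : Int) (maxLength : Int) : Prop :=
  1 ≤ minLength ∨ maxLength < minLength
instance (sequence : String) (minLength : Int) (maxLength : Int) : Decidable (Pre_restrictionSites sequence minLength maxLength) := by unfold Pre_restrictionSites; infer_instance

def pvWitness_restrictionSites : String × Int × Int := ("ACGT", 4, 12)

def Spec_restrictionSites (sequence : String) (minLength : Int) (maxLength : Int) (out : List (Int × String)) : Prop := out = restrictionSites_alt sequence minLength maxLength
instance (sequence : String) (minLength : Int) (maxLength : Int) (out : List (Int × String)) : Decidable (Spec_restrictionSites sequence minLength maxLength out) := by unfold Spec_restrictionSites; infer_instance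

-- ===== CLAIM (what is proved, stated in full; the proofs are below) =====
def Claim_equal_restrictionSites : Prop := ∀ (sequence : String) (minLength : Int) (maxLength : Int), Dom_restrictionSites sequence minLength maxLength → Pre_restrictionSites sequence minLength maxLength → Spec_restrictionSites sequence minLength maxLength (restrictionSites sequence minLength maxLength)

-- ===== LEMMAS AND PROOFS =====

-- pair-match predicate around center c
def pvMatch (l : List Char) (c : Int) (n : Int) : Prop :=
  ∀ j : Int, 0 ≤ j → j < n →
    pvComp (PySem.List.pyGetD l (c - j - 1) ' ') = PySem.List.pyGetD l (c + j) ' '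

-- the count of matching pairs around center c (what the while-loop of pvCollect walks through)
def pvExpandAux (l : List Char) (c : Int) : Nat → Int → Int
  | 0, k => k
  | fuel + 1, k =>
    if pvComp (PySem.List.pyGetD l (c - k - 1) ' ') = PySem.List.pyGetD l (c + k) ' '
    then pvExpandAux l c fuel (k + 1) else k

def pvExpand (l : List Char) (hmax c : Int) : Int :=
  pvExpandAux l c (min hmax (min c ((l.length : Int) - c))).toNat 0

-- value emitted for a site
def pvG (l : List Char) : Int × Int → Int × String :=
  fun p => (p.1 + 1, String.ofList (PySem.List.slice l (some p.1) (some (p.1 + 2 * p.2))))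

-- the (start, half-length) pairs in A's emission order
def pvEA (l : List Char) (hmin hmax : Int) : List (Int × Int) :=
  (PySem.List.pyRange 0 (l.length : Int)).flatMap (fun i =>
    ((PySem.List.pyRange hmin (hmax + 1)).filter (fun n =>
      decide (PySem.List.slice l (some i) (some (i + n)) ++
          (PySem.List.slice l (some i) (some (i + n))).reverse.map pvComp
        = PySem.List.slice l (some i) (some (i + 2 * n))))).map (fun n => (i, n)))

-- the (start, half-length) pairs in B's emission order
def pvSites (l : List Char) (lo hmax : Int) : List (Int × Int) :=
  (PySem.List.pyRange 0 ((l.length : Int) + 1)).flatMap (fun c =>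
    ((PySem.List.pyRange 1 (pvExpand l hmax c + 1)).filter (fun k => decide (lo ≤ k))).map
      (fun k => (c - k, k)))

theorem pvExpandAux_ge (l : List Char) (c : Int) :
    ∀ (fuel : Nat) (k : Int), k ≤ pvExpandAux l c fuel k := by
  intro fuel
  induction fuel with
  | zero => intro k; simp [pvExpandAux]
  | succ f ih =>
    intro k
    simp only [pvExpandAux]
    split
    · have := ih (k + 1); omega
    · omega

theorem revComp_eq (cs : List Char) : reverseComplement cs = cs.reverse.map pvComp := by
  unfold reverseComplement
  have hb : (fun (final : List Char) (i : Int) =>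
      if PySem.List.pyGetD cs i ' ' = 'A' then final ++ ['T']
      else if PySem.List.pyGetD cs i ' ' = 'T' then final ++ ['A']
      else if PySem.List.pyGetD cs i ' ' = 'G' then final ++ ['C']
      else final ++ ['G'])
      = fun final i => final ++ [pvComp (PySem.List.pyGetD cs i ' ')] := by
    funext final i; unfold pvComp; split_ifs <;> rfl
  rw [hb, PySem.List.foldl_append_singleton_eq_map]
  have h : PySem.List.pyRange (PySem.List.len cs - 1) (0 - 1) (-1)
      = (PySem.List.pyRange 0 (PySem.List.len cs) 1).reverse := by
    rw [PySem.List.pyRange_neg_one_eq_reverse]; norm_num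
  rw [h, List.map_reverse]
  have h2 : (PySem.List.pyRange 0 (PySem.List.len cs) 1).map
        (fun i => pvComp (PySem.List.pyGetD cs i ' '))
      = ((PySem.List.pyRange 0 (PySem.List.len cs) 1).map
        (fun i => PySem.List.pyGetD cs i ' ')).map pvComp := by
    rw [List.map_map]; rfl
  rw [h2, PySem.List.map_pyGetD_pyRange_zero]
  simp [List.map_reverse]

theorem pvExpandAux_le_iff (l : List Char) (c : Int) :
    ∀ (fuel : Nat) (k n : Int),
      (n ≤ pvExpandAux l c fuel k ↔
        n ≤ k ∨ (n ≤ k + fuel ∧ ∀ j : Int, k ≤ j → j < n →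
          pvComp (PySem.List.pyGetD l (c - j - 1) ' ') = PySem.List.pyGetD l (c + j) ' ')) := by
  intro fuel
  induction fuel with
  | zero =>
    intro k n
    simp only [pvExpandAux]
    constructor
    · intro h; exact Or.inl h
    · rintro (h | ⟨h, _⟩) <;> omega
  | succ f ih =>
    intro k n
    simp only [pvExpandAux]
    split
    · rename_i hmatch
      rw [ih (k + 1) n]
      constructor
      · rintro (h | ⟨h, hall⟩)
        · by_cases hk : n ≤ k
          · exact Or.inl hk
          · refine Or.inr ⟨by omega, ?_⟩
            intro j hj1 hj2
            have : j = k := by omega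
            subst this; exact hmatch
        · refine Or.inr ⟨by omega, ?_⟩
          intro j hj1 hj2
          by_cases hjk : j = k
          · subst hjk; exact hmatch
          · exact hall j (by omega) hj2
      · rintro (h | ⟨h, hall⟩)
        · exact Or.inl (by omega)
        · by_cases hk : n ≤ k + 1
          · exact Or.inl hk
          · exact Or.inr ⟨by omega, fun j hj1 hj2 => hall j (by omega) hj2⟩
    · rename_i hmatch
      constructor
      · intro h; exact Or.inl h
      · rintro (h | ⟨h, hall⟩)
        · exact h
        · by_cases hk : n ≤ k
          · exact hk
          · exact absurd (hall k (le_refl k) (by omega)) hmatch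

theorem pvExpand_le_iff (l : List Char) (hmax c n : Int) (hn : 1 ≤ n) :
    (n ≤ pvExpand l hmax c ↔
      (n ≤ hmax ∧ n ≤ c ∧ n ≤ (l.length : Int) - c) ∧ pvMatch l c n) := by
  unfold pvExpand pvMatch
  rw [pvExpandAux_le_iff]
  constructor
  · rintro (h | ⟨h, hall⟩)
    · omega
    · have : ((min hmax (min c ((l.length : Int) - c))).toNat : Int)
          = max (min hmax (min c ((l.length : Int) - c))) 0 := by omega
      rw [this] at h
      exact ⟨by omega, fun j hj1 hj2 => hall j hj1 hj2⟩
  · rintro ⟨h, hall⟩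
    refine Or.inr ⟨by omega, fun j hj1 hj2 => hall j hj1 hj2⟩

theorem getD_drop_char (l : List Char) (i' m : Nat) :
    (l.drop i').getD m ' ' = l.getD (i' + m) ' ' := by
  simp [List.getD_eq_getElem?_getD, List.getElem?_drop]

theorem pvCore (t : List Char) (n : Nat) (h1 : 1 ≤ n) (h0 : t ≠ []) :
    (t.take n ++ (t.take n).reverse.map pvComp = t.take (2 * n)) ↔
    (2 * n ≤ t.length ∧ ∀ j, j < n → pvComp (t.getD (n - 1 - j) ' ') = t.getD (n + j) ' ') := by
  have hw : 1 ≤ t.length := List.length_pos_of_ne_nil h0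
  have e1 : 2 * n ≤ t.length →
      (t.drop n).take n = (List.range n).map (fun j => t.getD (n + j) ' ') := by
    intro h2
    apply List.ext_getElem (by simp; omega)
    intro j hj1 hj2
    simp only [List.getElem_take, List.getElem_drop, List.getElem_map, List.getElem_range]
    rw [List.getD_eq_getElem t ' ' (by simp at hj1; omega)]
  have e2 : 2 * n ≤ t.length →
      (t.take n).reverse.map pvComp = (List.range n).map (fun j => pvComp (t.getD (n - 1 - j) ' ')) := by
    intro h2
    apply List.ext_getElem (by simp; omega)
    intro j hj1 hj2
    simp only [List.getElem_map, List.getElem_reverse, List.getElem_take, List.length_take, List.getElem_range]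
    rw [List.getD_eq_getElem t ' ' (by simp at hj1; omega)]
    congr 2
    simp at hj1
    omega
  constructor
  · intro h
    have hlen := congrArg List.length h
    simp only [List.length_append, List.length_map, List.length_reverse, List.length_take] at hlen
    have h2 : 2 * n ≤ t.length := by omega
    refine ⟨h2, ?_⟩
    rw [two_mul, List.take_add] at h
    have h4 := List.append_cancel_left h
    rw [e1 h2, e2 h2] at h4
    intro j hj
    have := List.map_inj_left.mp h4 j (List.mem_range.mpr hj)
    exact this
  · rintro ⟨h2, hall⟩
    rw [two_mul, List.take_add]
    congr 1
    rw [e1 h2, e2 h2]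
    exact List.map_inj_left.mpr (fun j hj => hall j (List.mem_range.mp hj))

theorem condA_iff (l : List Char) (i n : Int) (h0 : 0 ≤ i) (hiL : i < (l.length : Int)) (hn : 1 ≤ n) :
    (PySem.List.slice l (some i) (some (i + n)) ++
       (PySem.List.slice l (some i) (some (i + n))).reverse.map pvComp
       = PySem.List.slice l (some i) (some (i + 2 * n)))
    ↔ (i + 2 * n ≤ (l.length : Int) ∧ pvMatch l (i + n) n) := by
  have hs1 : PySem.List.slice l (some i) (some (i + n)) = (l.drop i.toNat).take n.toNat := by
    rw [PySem.List.slice_toNat l (by omega) (by omega)]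
    congr 1
    omega
  have hs2 : PySem.List.slice l (some i) (some (i + 2 * n)) = (l.drop i.toNat).take (2 * n.toNat) := by
    rw [PySem.List.slice_toNat l (by omega) (by omega)]
    congr 1
    omega
  rw [hs1, hs2]
  have htlen : (l.drop i.toNat).length = l.length - i.toNat := by simp
  have hne : l.drop i.toNat ≠ [] := List.ne_nil_of_length_pos (by omega)
  rw [pvCore (l.drop i.toNat) n.toNat (by omega) hne]
  constructor
  · rintro ⟨h2, hall⟩
    refine ⟨by omega, ?_⟩
    intro j hj0 hjn
    have hj' := hall j.toNat (by omega)
    rw [getD_drop_char, getD_drop_char] at hj'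
    have ea : PySem.List.pyGetD l (i + n - j - 1) ' ' = l.getD (i.toNat + (n.toNat - 1 - j.toNat)) ' ' := by
      rw [show i + n - j - 1 = ((i.toNat + (n.toNat - 1 - j.toNat) : Nat) : Int) by omega,
        PySem.List.pyGetD_natCast]
    have eb : PySem.List.pyGetD l (i + n + j) ' ' = l.getD (i.toNat + (n.toNat + j.toNat)) ' ' := by
      rw [show i + n + j = ((i.toNat + (n.toNat + j.toNat) : Nat) : Int) by omega,
        PySem.List.pyGetD_natCast]
    rw [show i + n - j - 1 = (i + n) - j - 1 by ring] at ea
    rw [show i + n + j = (i + n) + j by ring] at eb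
    rw [ea, eb, hj']
  · rintro ⟨h2, hm⟩
    refine ⟨by omega, ?_⟩
    intro j hj
    rw [getD_drop_char, getD_drop_char]
    have hj' := hm (j : Int) (by omega) (by omega)
    have ea : PySem.List.pyGetD l (i + n - (j : Int) - 1) ' ' = l.getD (i.toNat + (n.toNat - 1 - j)) ' ' := by
      rw [show i + n - (j : Int) - 1 = ((i.toNat + (n.toNat - 1 - j) : Nat) : Int) by omega,
        PySem.List.pyGetD_natCast]
    have eb : PySem.List.pyGetD l (i + n + (j : Int)) ' ' = l.getD (i.toNat + (n.toNat + j)) ' ' := by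
      rw [show i + n + (j : Int) = ((i.toNat + (n.toNat + j) : Nat) : Int) by omega,
        PySem.List.pyGetD_natCast]
    rw [show i + n - (j:Int) - 1 = (i + n) - (j:Int) - 1 by ring] at ea
    rw [show i + n + (j:Int) = (i + n) + (j:Int) by ring] at eb
    rw [← ea, ← eb, hj']

theorem hminA_eq (mn : Int) :
    (if PySem.Int.mod mn 2 = 0 then PySem.Int.floordiv mn 2 else PySem.Int.floordiv (mn + 1) 2)
      = -(PySem.Int.floordiv (-mn) 2) := by
  have h1 := PySem.Int.floordiv_mul_add_mod mn 2
  have h2 := PySem.Int.floordiv_mul_add_mod (mn + 1) 2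
  have h3 := PySem.Int.floordiv_mul_add_mod (-mn) 2
  have h4 := PySem.Int.mod_nonneg mn (by norm_num : (0:Int) < 2)
  have h5 := PySem.Int.mod_lt mn (by norm_num : (0:Int) < 2)
  have h6 := PySem.Int.mod_nonneg (mn + 1) (by norm_num : (0:Int) < 2)
  have h7 := PySem.Int.mod_lt (mn + 1) (by norm_num : (0:Int) < 2)
  have h8 := PySem.Int.mod_nonneg (-mn) (by norm_num : (0:Int) < 2)
  have h9 := PySem.Int.mod_lt (-mn) (by norm_num : (0:Int) < 2)
  split_ifs with h <;> omega

theorem hmaxA_eq (mx : Int) :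
    (if PySem.Int.mod mx 2 = 0 then PySem.Int.floordiv mx 2 else PySem.Int.floordiv (mx - 1) 2)
      = PySem.Int.floordiv mx 2 := by
  have h1 := PySem.Int.floordiv_mul_add_mod mx 2
  have h2 := PySem.Int.floordiv_mul_add_mod (mx - 1) 2
  have h4 := PySem.Int.mod_nonneg mx (by norm_num : (0:Int) < 2)
  have h5 := PySem.Int.mod_lt mx (by norm_num : (0:Int) < 2)
  have h6 := PySem.Int.mod_nonneg (mx - 1) (by norm_num : (0:Int) < 2)
  have h7 := PySem.Int.mod_lt (mx - 1) (by norm_num : (0:Int) < 2)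
  split_ifs with h <;> omega

theorem hminB_pos (mn : Int) (h : 1 ≤ mn) : 1 ≤ -(PySem.Int.floordiv (-mn) 2) := by
  have h3 := PySem.Int.floordiv_mul_add_mod (-mn) 2
  have h8 := PySem.Int.mod_nonneg (-mn) (by norm_num : (0:Int) < 2)
  have h9 := PySem.Int.mod_lt (-mn) (by norm_num : (0:Int) < 2)
  omega

theorem hrange_empty (mn mx : Int) (hmn : mn ≤ 0) (hmx : mx < mn) :
    PySem.Int.floordiv mx 2 + 1 ≤ -(PySem.Int.floordiv (-mn) 2)
      ∧ PySem.Int.floordiv mx 2 ≤ -1 := by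
  have h1 := PySem.Int.floordiv_mul_add_mod mx 2
  have h2 := PySem.Int.floordiv_mul_add_mod (-mn) 2
  have h4 := PySem.Int.mod_nonneg mx (by norm_num : (0:Int) < 2)
  have h5 := PySem.Int.mod_lt mx (by norm_num : (0:Int) < 2)
  have h6 := PySem.Int.mod_nonneg (-mn) (by norm_num : (0:Int) < 2)
  have h7 := PySem.Int.mod_lt (-mn) (by norm_num : (0:Int) < 2)
  omega


theorem collect_eq (l : List Char) (lo c : Int) :
    ∀ (fuel : Nat) (k : Int) (sites : List (Int × Int)),
      pvCollect l lo c fuel k sites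
        = sites ++ ((PySem.List.pyRange (k + 1) (pvExpandAux l c fuel k + 1)).filter
            (fun k' => decide (lo ≤ k'))).map (fun k' => (c - k', k')) := by
  intro fuel
  induction fuel with
  | zero =>
    intro k sites
    simp [pvCollect, pvExpandAux, PySem.List.pyRange_one_eq_nil (le_refl (k + 1))]
  | succ f ih =>
    intro k sites
    simp only [pvCollect, pvExpandAux]
    by_cases hm : pvComp (PySem.List.pyGetD l (c - k - 1) ' ') = PySem.List.pyGetD l (c + k) ' '
    · rw [if_pos hm, if_pos hm, ih]
      have hge := pvExpandAux_ge l c f (k + 1)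
      rw [PySem.List.pyRange_one_cons (a := k + 1) (b := pvExpandAux l c f (k + 1) + 1) (by omega)]
      rw [List.filter_cons]
      by_cases hlo : lo ≤ k + 1
      · rw [if_pos hlo, if_pos (by simpa using hlo)]
        simp [List.append_assoc]
      · rw [if_neg hlo, if_neg (by simpa using hlo)]
    · rw [if_neg hm, if_neg hm]
      simp [PySem.List.pyRange_one_eq_nil (le_refl (k + 1))]

theorem mem_pvSites (l : List Char) (lo hmax : Int) (hlo : 1 ≤ lo) (p : Int × Int) :
    p ∈ pvSites l lo hmax ↔
      (lo ≤ p.2 ∧ p.2 ≤ hmax ∧ 0 ≤ p.1 ∧ p.1 + 2 * p.2 ≤ (l.length : Int) ∧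
        pvMatch l (p.1 + p.2) p.2) := by
  unfold pvSites
  rw [List.mem_flatMap]
  constructor
  · rintro ⟨c, hc, hp⟩
    rcases PySem.List.mem_pyRange_one.mp hc with ⟨hc0, hcL⟩
    rcases List.mem_map.mp hp with ⟨k, hk, rfl⟩
    rcases List.mem_filter.mp hk with ⟨hkr, hklo⟩
    rcases PySem.List.mem_pyRange_one.mp hkr with ⟨hk1, hk2⟩
    have hklo' := of_decide_eq_true hklo
    have hexp := (pvExpand_le_iff l hmax c k hk1).mp (by omega)
    rcases hexp with ⟨⟨ha, hb, hc'⟩, hmm⟩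
    refine ⟨hklo', ha, by omega, by omega, ?_⟩
    simpa [show c - k + k = c by ring] using hmm
  · rintro ⟨h1, h2, h3, h4, hm⟩
    refine ⟨p.1 + p.2, PySem.List.mem_pyRange_one.mpr ⟨by omega, by omega⟩, ?_⟩
    refine List.mem_map.mpr ⟨p.2, ?_, by simp⟩
    refine List.mem_filter.mpr ⟨PySem.List.mem_pyRange_one.mpr ⟨by omega, ?_⟩, by simpa using h1⟩
    have := (pvExpand_le_iff l hmax (p.1 + p.2) p.2 (by omega)).mpr
      ⟨⟨h2, by omega, by omega⟩, hm⟩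
    omega

theorem mem_pvEA (l : List Char) (hmin hmax : Int) (hhmin : 1 ≤ hmin) (p : Int × Int) :
    p ∈ pvEA l hmin hmax ↔
      (hmin ≤ p.2 ∧ p.2 ≤ hmax ∧ 0 ≤ p.1 ∧ p.1 + 2 * p.2 ≤ (l.length : Int) ∧
        pvMatch l (p.1 + p.2) p.2) := by
  unfold pvEA
  rw [List.mem_flatMap]
  constructor
  · rintro ⟨i, hi, hp⟩
    rcases PySem.List.mem_pyRange_one.mp hi with ⟨hi0, hiL⟩
    rcases List.mem_map.mp hp with ⟨n, hn, rfl⟩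
    rcases List.mem_filter.mp hn with ⟨hnr, hcond⟩
    rcases PySem.List.mem_pyRange_one.mp hnr with ⟨hn1, hn2⟩
    have hc := of_decide_eq_true hcond
    rcases (condA_iff l i n hi0 hiL (by omega)).mp hc with ⟨hle, hm⟩
    exact ⟨hn1, by omega, hi0, hle, hm⟩
  · rintro ⟨h1, h2, h3, h4, hm⟩
    refine ⟨p.1, PySem.List.mem_pyRange_one.mpr ⟨h3, by omega⟩, ?_⟩
    refine List.mem_map.mpr ⟨p.2, ?_, by simp⟩
    refine List.mem_filter.mpr ⟨PySem.List.mem_pyRange_one.mpr ⟨h1, by omega⟩, ?_⟩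
    exact decide_eq_true ((condA_iff l p.1 p.2 h3 (by omega) (by omega)).mpr ⟨h4, hm⟩)

theorem nodup_pvSites (l : List Char) (lo hmax : Int) : (pvSites l lo hmax).Nodup := by
  unfold pvSites
  rw [List.nodup_flatMap]
  constructor
  · intro c _
    exact ((PySem.List.nodup_pyRange_one 1 (pvExpand l hmax c + 1)).filter _).map
      (fun a b hab => by simpa using congrArg (·.2) hab)
  · refine (PySem.List.pairwise_lt_pyRange_one 0 ((l.length : Int) + 1)).imp ?_
    intro c c' hcc
    intro p hp hp'
    rcases List.mem_map.mp hp with ⟨k, _, rfl⟩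
    rcases List.mem_map.mp hp' with ⟨k', _, hk'⟩
    have h1 : c - k + k = c := by ring
    have h2 : c' - k' + k' = c' := by ring
    have := congrArg (fun q => q.1 + q.2) hk'
    simp at this
    omega

theorem nodup_pvEA (l : List Char) (hmin hmax : Int) : (pvEA l hmin hmax).Nodup := by
  unfold pvEA
  rw [List.nodup_flatMap]
  constructor
  · intro i _
    exact ((PySem.List.nodup_pyRange_one hmin (hmax + 1)).filter _).map
      (fun a b hab => by simpa using congrArg (·.2) hab)
  · refine (PySem.List.pairwise_lt_pyRange_one 0 (l.length : Int)).imp ?_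
    intro i i' hii
    intro p hp hp'
    rcases List.mem_map.mp hp with ⟨n, _, rfl⟩
    rcases List.mem_map.mp hp' with ⟨n', _, hk'⟩
    have := congrArg (·.1) hk'
    simp at this
    omega

theorem pairwise_pvEA (l : List Char) (hmin hmax : Int) :
    (pvEA l hmin hmax).Pairwise (fun p q => toLex p < toLex q) := by
  unfold pvEA
  rw [List.pairwise_flatMap]
  constructor
  · intro i _
    refine List.Pairwise.map _ ?_
      (((PySem.List.pairwise_lt_pyRange_one hmin (hmax + 1)).sublist (List.filter_sublist)))
    intro a b hab
    exact Prod.Lex.lt_iff.mpr (Or.inr ⟨rfl, hab⟩)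
  · refine (PySem.List.pairwise_lt_pyRange_one 0 (l.length : Int)).imp ?_
    intro i i' hii p hp q hq
    rcases List.mem_map.mp hp with ⟨n, _, rfl⟩
    rcases List.mem_map.mp hq with ⟨n', _, rfl⟩
    exact Prod.Lex.lt_iff.mpr (Or.inl hii)

theorem sites_fold_eq (l : List Char) (lo hmax : Int) :
    (PySem.List.pyRange 0 ((l.length : Int) + 1)).foldl
      (fun sites c => pvCollect l lo c
        (min hmax (min c ((l.length : Int) - c))).toNat 0 sites) []
    = pvSites l lo hmax := by
  rw [PySem.List.foldl_congr_mem _ _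
      (fun sites c => sites ++
        ((PySem.List.pyRange 1 (pvExpand l hmax c + 1)).filter (fun k => decide (lo ≤ k))).map
          (fun k => (c - k, k))) _
      (fun sites c _ => by
        rw [collect_eq]
        rfl)]
  rw [PySem.List.foldl_append_eq_flatMap]
  rfl

theorem ports_eq (sequence : String) (minLength : Int) (maxLength : Int)
    (hpre : 1 ≤ minLength ∨ maxLength < minLength) :
    restrictionSites sequence minLength maxLength = restrictionSites_alt sequence minLength maxLength := by
  simp only [restrictionSites, restrictionSites_alt, PySem.List.len_eq]
  rw [hminA_eq, hmaxA_eq]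
  simp only [revComp_eq]
  by_cases hmn : 1 ≤ minLength
  · have h1 : 1 ≤ -(PySem.Int.floordiv (-minLength) 2) := hminB_pos minLength hmn
    rw [max_eq_left (by omega : (1 : Int) ≤ -(PySem.Int.floordiv (-minLength) 2))]
    by_cases hle : PySem.Int.floordiv maxLength 2 < -(PySem.Int.floordiv (-minLength) 2)
    · rw [if_pos hle]
      rw [PySem.List.pyRange_one_eq_nil (a := -(PySem.Int.floordiv (-minLength) 2))
        (b := PySem.Int.floordiv maxLength 2 + 1) (by omega)]
      exact Eq.trans (PySem.List.foldl_congr_mem _ _ (fun acc (_ : Int) => acc) _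
        (fun acc i _ => rfl)) (PySem.List.foldl_ignore _ _)
    · rw [if_neg hle]
      rw [sites_fold_eq sequence.toList (-(PySem.Int.floordiv (-minLength) 2))
        (PySem.Int.floordiv maxLength 2)]
      rw [PySem.List.sorted_eq_of_perm_of_pairwise_lt _
          (pvEA sequence.toList (-(PySem.Int.floordiv (-minLength) 2)) (PySem.Int.floordiv maxLength 2)) _
          ((List.perm_ext_iff_of_nodup (nodup_pvEA _ _ _) (nodup_pvSites _ _ _)).mpr (fun p => by
            rw [mem_pvEA _ _ _ h1 p, mem_pvSites _ _ _ h1 p]))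
          (pairwise_pvEA _ _ _)]
      refine Eq.trans (PySem.List.foldl_congr_mem _ _
        (fun acc i => acc ++
          ((PySem.List.pyRange (-(PySem.Int.floordiv (-minLength) 2)) (PySem.Int.floordiv maxLength 2 + 1)).filter
            (fun n => decide (PySem.List.slice sequence.toList (some i) (some (i + n)) ++
                (PySem.List.slice sequence.toList (some i) (some (i + n))).reverse.map pvComp
              = PySem.List.slice sequence.toList (some i) (some (i + 2 * n))))).map
            (fun n => pvG sequence.toList (i, n))) _
        (fun acc i _ => ?_)) ?_
      · rw [PySem.List.foldl_append_ite
            (p := fun n => PySem.List.slice sequence.toList (some i) (some (i + n)) ++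
                (PySem.List.slice sequence.toList (some i) (some (i + n))).reverse.map pvComp
              = PySem.List.slice sequence.toList (some i) (some (i + 2 * n)))
            (f := fun n => (i + 1, String.ofList (PySem.List.slice sequence.toList (some i) (some (i + n)) ++
                (PySem.List.slice sequence.toList (some i) (some (i + n))).reverse.map pvComp)))]
        congr 1
        refine List.map_congr_left (fun n hn => ?_)
        have hp := of_decide_eq_true (List.mem_filter.mp hn).2
        unfold pvG
        exact congrArg (fun u => (i + 1, String.ofList u)) hp
      · rw [PySem.List.foldl_append_eq_flatMap, List.nil_append]
        simp only [pvEA, List.map_flatMap, List.map_map, Function.comp_def, pvG]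
  · have hmx : maxLength < minLength := by rcases hpre with h | h <;> omega
    rcases hrange_empty minLength maxLength (by omega) hmx with ⟨he1, he2⟩
    rw [if_pos (by
      have := le_max_right (-(PySem.Int.floordiv (-minLength) 2)) (1 : Int)
      omega)]
    rw [PySem.List.pyRange_one_eq_nil (a := -(PySem.Int.floordiv (-minLength) 2))
      (b := PySem.Int.floordiv maxLength 2 + 1) he1]
    exact Eq.trans (PySem.List.foldl_congr_mem _ _ (fun acc (_ : Int) => acc) _
      (fun acc i _ => rfl)) (PySem.List.foldl_ignore _ _)


-- ===== VERDICT (by name: the statement is the Claim_ definition above) =====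
theorem restrictionSites_spec : Claim_equal_restrictionSites := by
  intro sequence minLength maxLength _ hpre
  exact ports_eq sequence minLength maxLength hpre
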